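-- pv_equiv track=rewrite | github.com/GlacyalWolf/programingAlgoritms2 | List2/isUnvariateWord.py | is_univariate_word
-- ===== SOURCE A (Python) =====
-- def is_univariate_word(s):
--     '''
--     >>> is_univariate_word('xxXxxxXX')
--     True
--     >>> is_univariate_word('xyyyyYYY')
--     False
--     >>> is_univariate_word('y')
--     True
--     >>> is_univariate_word('yyyyx')
--     False
--     '''
--     s=str.lower(s);
--     comp=s[0];
--     ret=True;
--
--     for i in s:
--         if(comp!=i):
--             ret=False;
--
--     return ret;
-- ===== SOURCE B (Python) =====
-- def is_univariate_word(s):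
--     return len(set(s.lower())) <= 1
-- ===== Notes on version B (the rewrite author's own statement) =====
-- stated objective: idiomatic
-- what changed: Replaced the manual compare-each-char-to-the-first loop by the idiomatic distinct-character set: lowercase s and test len(set(...)) <= 1.
-- outside the precondition, e.g. on is_univariate_word(''): A raises IndexError, B returns True
import Mathlib
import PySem

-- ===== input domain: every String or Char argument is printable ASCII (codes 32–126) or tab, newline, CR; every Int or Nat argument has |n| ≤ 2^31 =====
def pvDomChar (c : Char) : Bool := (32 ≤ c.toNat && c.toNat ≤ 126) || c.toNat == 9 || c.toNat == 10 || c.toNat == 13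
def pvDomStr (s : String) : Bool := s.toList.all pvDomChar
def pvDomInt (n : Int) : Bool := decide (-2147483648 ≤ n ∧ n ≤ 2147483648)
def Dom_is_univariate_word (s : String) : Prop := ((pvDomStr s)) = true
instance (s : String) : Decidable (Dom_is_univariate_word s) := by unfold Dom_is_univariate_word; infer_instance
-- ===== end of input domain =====

-- B replaces A's compare-each-char-to-the-first loop by the idiomatic distinct-character
-- set test len(set(s.lower())) <= 1; on the empty string A raises IndexError (excluded by Pre_).

-- ===== PORT A =====
def is_univariate_word (s : String) : Bool :=
  let t := PySem.Chars.lower s.toList        -- s = str.lower(s)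
  match PySem.List.pyGet? t 0 with           -- comp = s[0]  (IndexError on '' → outside Pre_)
  | none => false
  | some comp =>
    t.foldl (fun ret i => if comp ≠ i then false else ret) true

-- ===== PORT B =====
def is_univariate_word_alt (s : String) : Bool :=
  decide (PySem.Set.len (PySem.Set.ofList (PySem.Chars.lower s.toList)) ≤ 1)

-- ===== PRECONDITION & SPEC =====
-- Pre_ excludes only the empty string, on which A raises IndexError (s[0]).
def Pre_is_univariate_word (s : String) : Prop := s.toList ≠ []
instance (s : String) : Decidable (Pre_is_univariate_word s) := by unfold Pre_is_univariate_word; infer_instance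
def pvWitness_is_univariate_word : String := "xXx"

def Spec_is_univariate_word (s : String) (out : Bool) : Prop := out = is_univariate_word_alt s
instance (s : String) (out : Bool) : Decidable (Spec_is_univariate_word s out) := by unfold Spec_is_univariate_word; infer_instance

-- ===== CLAIM (what is proved, stated in full; the proofs are below) =====
def Claim_equal_is_univariate_word : Prop := ∀ (s : String), Dom_is_univariate_word s → Pre_is_univariate_word s → Spec_is_univariate_word s (is_univariate_word s)

-- ===== LEMMAS AND PROOFS =====

-- A's loop: ret stays true iff every char equals comp.
theorem foldA_eq_all (comp : Char) (l : List Char) (b : Bool) :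
    l.foldl (fun ret i => if comp ≠ i then false else ret) b
      = (b && l.all (fun i => comp == i)) := by
  induction l generalizing b with
  | nil => simp
  | cons a l ih =>
    simp only [List.foldl_cons, List.all_cons, ih]
    by_cases h : comp = a <;> simp [h]

theorem ofList_len_mono {α : Type} [BEq α] (l : List α) (s : PySem.Set α) :
    s.length ≤ (l.foldl PySem.Set.add s).length := by
  induction l generalizing s with
  | nil => simp
  | cons a l ih =>
    refine le_trans ?_ (ih (PySem.Set.add s a))
    simp only [PySem.Set.add]
    split <;> simp

theorem foldl_add_prefix {α : Type} [BEq α] (l : List α) (s : PySem.Set α) :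
    ∃ t, l.foldl PySem.Set.add s = s ++ t := by
  induction l generalizing s with
  | nil => exact ⟨[], by simp⟩
  | cons a l ih =>
    simp only [List.foldl_cons, PySem.Set.add]
    split
    · exact ih s
    · obtain ⟨t, ht⟩ := ih (s ++ [a])
      exact ⟨a :: t, by simpa using ht⟩

theorem foldl_add_singleton (c : Char) (l : List Char) :
    (l.foldl PySem.Set.add [c] = [c]) ↔ l.all (fun i => c == i) := by
  induction l with
  | nil => simp
  | cons a l ih =>
    simp only [List.foldl_cons, List.all_cons]
    by_cases h : c = a
    · subst h
      simpa [PySem.Set.add, PySem.Set.contains] using ih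
    · have hadd : PySem.Set.add [c] a = [c, a] := by
        have hne : ¬ a = c := fun h2 => h (Eq.symm h2)
        simp [PySem.Set.add, PySem.Set.contains, hne]
      rw [hadd]
      constructor
      · intro heq
        have := ofList_len_mono l [c, a]
        rw [heq] at this
        simp at this
      · intro hall
        simp [beq_iff_eq, h] at hall

-- ===== VERDICT (by name: the statement is the Claim_ definition above) =====
theorem is_univariate_word_spec : Claim_equal_is_univariate_word := by
  intro s _ hpre
  unfold Spec_is_univariate_word is_univariate_word is_univariate_word_alt
  obtain ⟨c, rest, hl⟩ : ∃ c rest, PySem.Chars.lower s.toList = c :: rest := by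
    cases h : s.toList with
    | nil => exact absurd h hpre
    | cons x xs =>
      exact ⟨PySem.Chars.lowerChar x, xs.map PySem.Chars.lowerChar, by simp [PySem.Chars.lower]⟩
  rw [hl]
  simp only [PySem.List.pyGet?_zero_cons]
  rw [foldA_eq_all]
  simp only [Bool.true_and, List.all_cons, beq_self_eq_true, Bool.true_and]
  unfold PySem.Set.ofList PySem.Set.len
  simp only [List.foldl_cons]
  show (rest.all fun i => c == i) = decide (((rest.foldl PySem.Set.add [c]).length : Int) ≤ 1)
  by_cases hall : rest.all (fun i => c == i) = true
  · rw [hall, (foldl_add_singleton c rest).mpr hall]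
    simp
  · have hne : rest.foldl PySem.Set.add [c] ≠ [c] :=
      fun h => hall ((foldl_add_singleton c rest).mp h)
    obtain ⟨t, ht⟩ := foldl_add_prefix rest [c]
    cases t with
    | nil => exact absurd (by simpa using ht) hne
    | cons x xs =>
      rw [Bool.not_eq_true] at hall
      rw [hall, ht]
      simp
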